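-- pv_equiv track=rewrite | github.com/xzyuming/User-Scheduling-in-5G | Project.py | ipRe
-- ===== SOURCE A (Python) =====
-- def ipRe(arr):
--     rem = []
--     res = [arr[0]]
--     for i in range(1,len(arr)):
--         res.append(arr[i])
--         if res[-1][1]<=res[-2][1]:
--             rem.append(res.pop())
--
--     return rem
-- ===== SOURCE B (Python) =====
-- def ipRe(arr):
--     # Pass 1: prefix maxima of the second fields (pmax[i] = max of arr[0..i][1]).
--     n = len(arr)
--     pmax = [arr[0][1]] * n
--     for i in range(1, n):
--         pmax[i] = pmax[i - 1] if pmax[i - 1] >= arr[i][1] else arr[i][1]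
--     # Pass 2: keep the elements that do not exceed the maximum seen before them.
--     return [arr[i] for i in range(1, n) if arr[i][1] <= pmax[i - 1]]
-- ===== Notes on version B (the rewrite author's own statement) =====
-- stated objective: alternative
-- what changed: B replaces A's single-pass kept-stack with two staged passes: it first materializes a prefix-maximum table of the second fields, then selects by comprehension the elements not exceeding the prefix maximum before them; no stack, no pops, no conditional accumulator.
import Mathlib
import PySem

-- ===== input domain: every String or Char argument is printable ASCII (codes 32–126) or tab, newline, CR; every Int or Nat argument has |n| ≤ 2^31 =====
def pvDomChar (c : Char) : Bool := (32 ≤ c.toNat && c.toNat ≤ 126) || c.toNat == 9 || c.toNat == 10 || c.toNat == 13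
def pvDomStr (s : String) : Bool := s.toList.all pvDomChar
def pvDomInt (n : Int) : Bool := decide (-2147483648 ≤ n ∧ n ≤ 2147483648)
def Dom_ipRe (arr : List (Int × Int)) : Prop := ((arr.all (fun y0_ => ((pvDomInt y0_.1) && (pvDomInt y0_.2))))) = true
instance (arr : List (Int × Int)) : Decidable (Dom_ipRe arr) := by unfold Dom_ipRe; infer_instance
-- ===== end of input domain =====

-- B: two staged passes (prefix-maximum table, then a filtering comprehension) instead of A's
-- single pass with a kept-stack and pops. Both raise IndexError on the empty list (outside Pre_).

-- ===== PORT A =====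
-- res is A's stack stored in reverse (head = Python res[-1]); rem accumulates popped elements in order.
def ipReGoA (res : List (Int × Int)) (rem : List (Int × Int)) : List (Int × Int) → List (Int × Int)
  | [] => rem
  | x :: t =>
    let res' := x :: res                        -- res.append(arr[i])
    if x.2 ≤ ((res'.tail).headD (0, 0)).2 then  -- res[-1][1] <= res[-2][1]
      ipReGoA res'.tail (rem ++ [x]) t          -- rem.append(res.pop())
    else
      ipReGoA res' rem t

def ipRe (arr : List (Int × Int)) : List (Int × Int) :=
  match arr with
  | [] => []                                    -- Python raises IndexError here; outside Pre_
  | a :: rest => ipReGoA [a] [] rest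

-- ===== PORT B =====
-- Pass 1: the prefix-maximum table for entries 1..n-1, given the maximum so far.
def ipRePmax (prev : Int) : List (Int × Int) → List Int
  | [] => []
  | x :: t =>
    let m := if prev ≥ x.2 then prev else x.2
    m :: ipRePmax m t

-- Pass 2: keep arr[i] (i ≥ 1) iff arr[i][1] ≤ pmax[i-1]; pm is pmax shifted by one.
def ipReFilter : List (Int × Int) → List Int → List (Int × Int)
  | x :: t, m :: ms => (if x.2 ≤ m then [x] else []) ++ ipReFilter t ms
  | _, _ => []

def ipRe_alt (arr : List (Int × Int)) : List (Int × Int) :=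
  match arr with
  | [] => []                                    -- Python raises IndexError here; outside Pre_
  | a :: rest => ipReFilter rest (a.2 :: ipRePmax a.2 rest)

-- ===== PRECONDITION & SPEC =====
-- Pre_ excludes only the empty list, on which A (arr[0]) raises IndexError (and so does B).
def Pre_ipRe (arr : List (Int × Int)) : Prop := arr ≠ []
instance (arr : List (Int × Int)) : Decidable (Pre_ipRe arr) := by unfold Pre_ipRe; infer_instance
def pvWitness_ipRe : (List (Int × Int)) := [(1, 2), (3, 1)]

def Spec_ipRe (arr : List (Int × Int)) (out : List (Int × Int)) : Prop := out = ipRe_alt arr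
instance (arr : List (Int × Int)) (out : List (Int × Int)) : Decidable (Spec_ipRe arr out) := by unfold Spec_ipRe; infer_instance

-- ===== CLAIM (what is proved, stated in full; the proofs are below) =====
def Claim_equal_ipRe : Prop := ∀ (arr : List (Int × Int)), Dom_ipRe arr → Pre_ipRe arr → Spec_ipRe arr (ipRe arr)

-- ===== LEMMAS AND PROOFS =====
-- A's stack top is the running maximum, which is exactly the prefix-max entry B filters against.
theorem ipReGo_eq (t : List (Int × Int)) :
    ∀ (top : Int × Int) (res rem : List (Int × Int)),
      ipReGoA (top :: res) rem t = rem ++ ipReFilter t (top.2 :: ipRePmax top.2 t) := by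
  induction t with
  | nil => intro top res rem; simp [ipReGoA, ipReFilter]
  | cons x t ih =>
    intro top res rem
    by_cases h : x.2 ≤ top.2
    · -- x.2 ≤ top.2, so the new prefix maximum is still top.2
      simp only [ipReGoA, ipRePmax, ipReFilter, List.tail_cons, List.headD_cons,
        if_pos h]
      rw [ih top res (rem ++ [x])]
      simp
    · -- x.2 > top.2, so the new prefix maximum is x.2
      simp only [ipReGoA, ipRePmax, ipReFilter, List.tail_cons, List.headD_cons,
        if_neg h]
      rw [ih x (top :: res) rem]
      simp

-- ===== VERDICT (by name: the statement is the Claim_ definition above) =====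
theorem ipRe_spec : Claim_equal_ipRe := by
  intro arr _ hpre
  unfold Spec_ipRe
  cases arr with
  | nil => exact absurd rfl hpre
  | cons a rest => simpa [ipRe, ipRe_alt] using ipReGo_eq rest a [] []
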